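-- pv_equiv track=rewrite | github.com/Guitlle/wp-ocds | scraping/guatecompras.py | ExtractHTMLFromUglyASPResponse
-- ===== SOURCE A (Python) =====
-- def ExtractHTMLFromUglyASPResponse(responseText):
--     """ Extract the HTML from an ASP.NET response obtained from guatecompras.
--     These ajax responses contain lots of fields that are apparently separated
--     by | chars.
--     """
--     lines = responseText.splitlines()
--     htmlContent = ""
--     flag = 0
--     for line in lines:
--         line = line.strip()
--         if len(line) == 0:
--             continue
--         if flag == 1:
--             if line[0] == "|" and flag == 1:
--                 break
--             else:
--                 htmlContent += "\n" + line
--         elif "|MasterGC_ContentBlockHolder_ctl01|" in line: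
--             flag = 1
--
--     return htmlContent
-- ===== SOURCE B (Python) =====
-- MARKER = "|MasterGC_ContentBlockHolder_ctl01|"
--
-- def ExtractHTMLFromUglyASPResponse(responseText):
--     """Locate-then-collect: find the marker line among the non-empty stripped
--     lines, then gather following lines up to the first one starting with '|'."""
--     lines = [l for l in map(str.strip, responseText.splitlines()) if l]
--     idx = next((i for i, l in enumerate(lines) if MARKER in l), None)
--     if idx is None:
--         return ""
--     body = []
--     for l in lines[idx + 1:]:
--         if l.startswith("|"):
--             break
--         body.append(l)
--     return "".join("\n" + l for l in body)
-- ===== Notes on version B (the rewrite author's own statement) =====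
-- stated objective: idiomatic
-- what changed: Replaces A's single-pass flag state machine with a locate-then-collect decomposition: pre-strip and drop empty lines, find the marker line's index with next/enumerate, take the following lines up to the next pipe-delimited field line, and join them each with a leading newline.
import Mathlib
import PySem

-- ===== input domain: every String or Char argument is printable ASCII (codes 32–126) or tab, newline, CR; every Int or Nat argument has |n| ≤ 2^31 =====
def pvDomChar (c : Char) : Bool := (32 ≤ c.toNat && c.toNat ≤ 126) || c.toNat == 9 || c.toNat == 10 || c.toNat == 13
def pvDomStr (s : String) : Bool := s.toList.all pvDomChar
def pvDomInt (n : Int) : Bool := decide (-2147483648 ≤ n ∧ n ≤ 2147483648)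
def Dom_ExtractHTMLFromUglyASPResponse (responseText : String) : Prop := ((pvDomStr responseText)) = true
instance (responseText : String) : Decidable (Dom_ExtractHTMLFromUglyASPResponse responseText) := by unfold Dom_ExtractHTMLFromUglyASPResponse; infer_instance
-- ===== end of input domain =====

-- B replaces A's flag state machine by a locate-then-collect pipeline over the
-- pre-stripped non-empty lines (a different decomposition; same linear cost).

-- ===== PORT A =====
-- A's for-loop with `break`, as structural recursion over the lines;
-- state = (flag, htmlContent)
def pvALoop : List String → Nat → String → String
  | [], _, acc => acc
  | l :: ls, flag, acc =>
    let line := PySem.Str.strip l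
    if PySem.Str.len line = 0 then pvALoop ls flag acc
    else if flag = 1 then
      (if PySem.Str.pyGet? line 0 = some '|' ∧ flag = 1 then acc   -- break
       else pvALoop ls flag (PySem.Str.join "" [acc, "\n", line]))
    else if PySem.Str.isIn "|MasterGC_ContentBlockHolder_ctl01|" line then
      pvALoop ls 1 acc
    else pvALoop ls flag acc

def ExtractHTMLFromUglyASPResponse (responseText : String) : String :=
  pvALoop (PySem.Str.splitlines responseText) 0 ""

-- ===== PORT B =====
def pvMarker : String := "|MasterGC_ContentBlockHolder_ctl01|"

-- B's collect loop (for l in …: if l.startswith('|'): break; body.append(l))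
def pvTakeBody : List String → List String
  | [] => []
  | l :: ls => if PySem.Str.startswith l "|" then [] else l :: pvTakeBody ls

def ExtractHTMLFromUglyASPResponse_alt (responseText : String) : String :=
  let lines := ((PySem.Str.splitlines responseText).map PySem.Str.strip).filter
      (fun l => !(PySem.Str.len l = 0 : Bool))
  match lines.findIdx? (fun l => PySem.Str.isIn pvMarker l) with
  | none => ""
  | some i =>
      PySem.Str.join "" ((pvTakeBody (lines.drop (i + 1))).map
        (fun l => PySem.Str.join "" ["\n", l]))

-- ===== PRECONDITION & SPEC =====
def Spec_ExtractHTMLFromUglyASPResponse (responseText : String) (out : String) : Prop := out = ExtractHTMLFromUglyASPResponse_alt responseText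
instance (responseText : String) (out : String) : Decidable (Spec_ExtractHTMLFromUglyASPResponse responseText out) := by unfold Spec_ExtractHTMLFromUglyASPResponse; infer_instance

-- ===== CLAIM (what is proved, stated in full; the proofs are below) =====
def Claim_equal_ExtractHTMLFromUglyASPResponse : Prop := ∀ (responseText : String), Dom_ExtractHTMLFromUglyASPResponse responseText → Spec_ExtractHTMLFromUglyASPResponse responseText (ExtractHTMLFromUglyASPResponse responseText)

-- ===== LEMMAS AND PROOFS =====

-- proof-only names for B's three phases: filtered stripped lines, the join, the result
def pvF (ls : List String) : List String :=
  (ls.map PySem.Str.strip).filter (fun l => !(PySem.Str.len l = 0 : Bool))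

def pvJ (body : List String) : String :=
  PySem.Str.join "" (body.map (fun l => PySem.Str.join "" ["\n", l]))

def pvRes (ls : List String) : String :=
  match ls.findIdx? (fun l => PySem.Str.isIn pvMarker l) with
  | none => ""
  | some i => pvJ (pvTakeBody (ls.drop (i + 1)))

lemma pvJ_nil : (pvJ []).toList = [] := by
  simp [pvJ, PySem.Str.toList_join, PySem.Chars.join, List.intercalate]

lemma pvJ_cons (l : String) (body : List String) :
    (pvJ (l :: body)).toList = '\n' :: (l.toList ++ (pvJ body).toList) := by
  unfold pvJ
  induction body with
  | nil => simp [PySem.Str.toList_join, PySem.Chars.join, List.intercalate, List.intersperse]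
  | cons b bs ih => simp_all [PySem.Str.toList_join, PySem.Chars.join, List.intercalate, List.intersperse]

lemma pvJoin3 (a c : String) :
    (PySem.Str.join "" [a, "\n", c]).toList = a.toList ++ '\n' :: c.toList := by
  simp [PySem.Str.toList_join, PySem.Chars.join, List.intercalate, List.intersperse]

-- on a non-empty line, Python's line[0] == "|" is exactly startswith('|')
lemma pvHead_pipe (l : String) (h : l.toList ≠ []) :
    (PySem.Str.pyGet? l 0 = some '|') ↔ PySem.Str.startswith l "|" = true := by
  rw [show (0:Int) = ((0:Nat):Int) from rfl, PySem.Str.pyGet?_natCast]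
  rw [PySem.Str.startswith_eq, PySem.Chars.startswith_iff]
  rcases hc : l.toList with _ | ⟨c, cs⟩
  · exact absurd hc h
  · rw [show ("|" : String).toList = ['|'] from rfl]
    simp [List.prefix_cons_iff, eq_comm]

lemma pvLen_zero (l : String) : (PySem.Str.len l = 0) ↔ l.toList = [] := by
  simp [PySem.Str.len_eq]

lemma pvALoop_cons (l : String) (ls : List String) (flag : Nat) (acc : String) :
    pvALoop (l :: ls) flag acc =
      (if PySem.Str.len (PySem.Str.strip l) = 0 then pvALoop ls flag acc
       else if flag = 1 then
         (if PySem.Str.pyGet? (PySem.Str.strip l) 0 = some '|' ∧ flag = 1 then acc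
          else pvALoop ls flag (PySem.Str.join "" [acc, "\n", PySem.Str.strip l]))
       else if PySem.Str.isIn "|MasterGC_ContentBlockHolder_ctl01|" (PySem.Str.strip l) then
         pvALoop ls 1 acc
       else pvALoop ls flag acc) := rfl

lemma pvF_cons_zero (l : String) (ls : List String) (h : PySem.Str.len (PySem.Str.strip l) = 0) :
    pvF (l :: ls) = pvF ls := by
  simp only [pvF, List.map_cons, List.filter_cons, h]
  simp

lemma pvF_cons_pos (l : String) (ls : List String) (h : ¬ PySem.Str.len (PySem.Str.strip l) = 0) :
    pvF (l :: ls) = PySem.Str.strip l :: pvF ls := by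
  simp only [pvF, List.map_cons, List.filter_cons]
  rw [if_pos (by simpa using h)]

-- A with flag = 1 appends exactly B's collect-phase output
lemma pvFlag1 (ls : List String) (acc : String) :
    (pvALoop ls 1 acc).toList = acc.toList ++ (pvJ (pvTakeBody (pvF ls))).toList := by
  induction ls generalizing acc with
  | nil => simp [pvALoop, pvF, pvJ_nil, pvTakeBody]
  | cons l ls ih =>
    rw [pvALoop_cons]
    by_cases h0 : PySem.Str.len (PySem.Str.strip l) = 0
    · rw [if_pos h0, pvF_cons_zero _ _ h0]; exact ih acc
    · have hne : (PySem.Str.strip l).toList ≠ [] := fun hh => h0 ((pvLen_zero _).mpr hh)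
      rw [if_neg h0, if_pos rfl, pvF_cons_pos _ _ h0]
      by_cases hp : PySem.Str.startswith (PySem.Str.strip l) "|" = true
      · rw [if_pos ⟨(pvHead_pipe _ hne).mpr hp, rfl⟩, pvTakeBody, if_pos hp, pvJ_nil,
          List.append_nil]
      · have hg : ¬ (PySem.Str.pyGet? (PySem.Str.strip l) 0 = some '|') :=
          fun hh => hp ((pvHead_pipe _ hne).mp hh)
        rw [if_neg (fun hh => hg hh.1), ih, pvTakeBody, if_neg hp, pvJ_cons, pvJoin3]
        simp

-- A with flag = 0 computes B's locate-then-collect result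
lemma pvFlag0 (ls : List String) (acc : String) :
    (pvALoop ls 0 acc).toList = acc.toList ++ (pvRes (pvF ls)).toList := by
  induction ls generalizing acc with
  | nil => simp [pvALoop, pvF, pvRes]
  | cons l ls ih =>
    rw [pvALoop_cons]
    by_cases h0 : PySem.Str.len (PySem.Str.strip l) = 0
    · rw [if_pos h0, pvF_cons_zero _ _ h0]; exact ih acc
    · rw [if_neg h0, if_neg (by decide : ¬ (0 = 1)), pvF_cons_pos _ _ h0]
      by_cases hm : PySem.Str.isIn "|MasterGC_ContentBlockHolder_ctl01|" (PySem.Str.strip l) = true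
      · rw [if_pos hm]
        unfold pvRes
        rw [List.findIdx?_cons]
        rw [show (PySem.Str.isIn pvMarker (PySem.Str.strip l)) = true from hm]
        simpa using pvFlag1 ls acc
      · rw [if_neg hm, ih]
        unfold pvRes
        rw [List.findIdx?_cons]
        rw [show (PySem.Str.isIn pvMarker (PySem.Str.strip l)) = false from
          Bool.eq_false_iff.mpr (fun hh => hm hh)]
        cases List.findIdx? (fun l => PySem.Str.isIn pvMarker l) (pvF ls) <;>
          simp [List.drop_succ_cons]

-- ===== VERDICT (by name: the statement is the Claim_ definition above) =====
theorem ExtractHTMLFromUglyASPResponse_spec : Claim_equal_ExtractHTMLFromUglyASPResponse := by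
  intro t _
  unfold Spec_ExtractHTMLFromUglyASPResponse
  have h := pvFlag0 (PySem.Str.splitlines t) ""
  have halt : ExtractHTMLFromUglyASPResponse_alt t = pvRes (pvF (PySem.Str.splitlines t)) := rfl
  apply String.toList_inj.mp
  rw [halt]
  simpa using h
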